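-- pv_equiv track=rewrite | github.com/dong9409/DongGyu1 | CLI과제/a2_jkim543.py | parse_for_user
-- ===== SOURCE A (Python) =====
-- def parse_for_user(file_line_list):  # provided
--     "call this function when 'a2_<st_id>.py -l user'"
--     return_set = set()  # quick and dirty way of ignoring repeats
--     for line in file_line_list:
--         if line == '':  # if the line is empty, ignore it
--             pass
--         else:
--             splitted = line.split()  # split the line by whitespace
--             return_set.add(splitted[0])  # first item in the splitted is user
--     return_list = list(return_set)  # convert this to a list, and
--     return_list.sort()  # sort alphabetically
--     return return_list
-- ===== SOURCE B (Python) =====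
-- def parse_for_user(file_line_list):
--     # B: maintain the result as a sorted list without duplicates, locating each
--     # first token's position by binary search and inserting it there unless it
--     # is already present.  No set and no sort call; same IndexError as A on
--     # whitespace-only lines.
--     result = []
--     for line in file_line_list:
--         if line != '':
--             t = line.split()[0]
--             lo, hi = 0, len(result)
--             while lo < hi:
--                 mid = (lo + hi) // 2
--                 if result[mid] < t:
--                     lo = mid + 1
--                 else:
--                     hi = mid
--             if lo == len(result) or result[lo] != t:
--                 result.insert(lo, t)
--     return result
-- ===== Notes on version B (the rewrite author's own statement) =====
-- stated objective: alternative
-- what changed: B replaces A's hash-set collection followed by a final sort with online ordered insertion: the result is kept sorted and duplicate-free at every step, each token's slot found by binary search, so no set and no sort call exist.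
import Mathlib
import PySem

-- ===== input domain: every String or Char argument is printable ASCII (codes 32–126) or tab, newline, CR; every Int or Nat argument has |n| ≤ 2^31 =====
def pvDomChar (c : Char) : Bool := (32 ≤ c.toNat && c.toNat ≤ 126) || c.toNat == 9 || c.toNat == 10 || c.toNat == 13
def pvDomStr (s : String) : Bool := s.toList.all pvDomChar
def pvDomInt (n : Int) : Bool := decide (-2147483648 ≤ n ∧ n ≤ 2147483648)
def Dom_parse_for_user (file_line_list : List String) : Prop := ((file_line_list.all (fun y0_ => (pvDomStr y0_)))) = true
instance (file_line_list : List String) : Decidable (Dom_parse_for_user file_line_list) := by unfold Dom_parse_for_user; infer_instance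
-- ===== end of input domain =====

-- B keeps the result sorted and duplicate-free at all times, binary-searching each
-- token's slot and inserting it there, instead of A's set collection plus final sort.

-- ===== PORT A =====
-- loop over lines, adding the first token of each non-empty line to a set;
-- none = Python's IndexError on a whitespace-only (but non-empty) line
def pvLoopA : List String → PySem.Set String → Option (PySem.Set String)
  | [], s => some s
  | line :: rest, s =>
    if line = "" then pvLoopA rest s
    else
      match PySem.List.pyGet? (PySem.Str.split₀ line) 0 with
      | none => none
      | some t => pvLoopA rest (PySem.Set.add s t)

def parse_for_user (file_line_list : List String) : List String :=
  match pvLoopA file_line_list PySem.Set.empty with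
  | none => []  -- unreachable under Pre_ (Python raises IndexError here)
  | some s => PySem.List.sorted s (fun x => x) false

-- ===== PORT B =====
-- the 'while lo < hi' binary-search loop; result[mid] is in range, so getD is exact
def pvBis (r : List String) (t : String) (lo hi : Nat) : Nat :=
  if h : lo < hi then
    let mid := (lo + hi) / 2
    if r.getD mid "" < t then pvBis r t (mid + 1) hi else pvBis r t lo mid
  else lo
termination_by hi - lo
decreasing_by all_goals omega

-- the loop body after the search: 'if lo == len(result) or result[lo] != t: result.insert(lo, t)';
-- 0 ≤ i ≤ len(result), so insert(i, t) is exactly take/++/drop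
def pvStepB (r : List String) (t : String) : List String :=
  let i := pvBis r t 0 r.length
  if i = r.length ∨ ¬ (r.getD i "" = t) then r.take i ++ t :: r.drop i else r

-- loop over lines; none = Python's IndexError on a whitespace-only (but non-empty) line
def pvLoopB : List String → List String → Option (List String)
  | [], r => some r
  | line :: rest, r =>
    if line = "" then pvLoopB rest r
    else
      match PySem.List.pyGet? (PySem.Str.split₀ line) 0 with
      | none => none
      | some t => pvLoopB rest (pvStepB r t)

def parse_for_user_alt (file_line_list : List String) : List String :=
  match pvLoopB file_line_list [] with
  | none => []  -- unreachable under Pre_ (Python raises IndexError here)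
  | some r => r

-- ===== PRECONDITION & SPEC =====
-- Pre_ excludes lists containing a non-empty whitespace-only line, on which A
-- (and B) raise IndexError from split()[0].
def Pre_parse_for_user (file_line_list : List String) : Prop :=
  ∀ s ∈ file_line_list, s ≠ "" → PySem.Str.split₀ s ≠ []
instance (file_line_list : List String) : Decidable (Pre_parse_for_user file_line_list) := by
  unfold Pre_parse_for_user; infer_instance
def pvWitness_parse_for_user : List String := ["alice x", "", "bob", "alice y"]

def Spec_parse_for_user (file_line_list : List String) (out : List String) : Prop := out = parse_for_user_alt file_line_list
instance (file_line_list : List String) (out : List String) : Decidable (Spec_parse_for_user file_line_list out) := by unfold Spec_parse_for_user; infer_instance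

-- ===== CLAIM (what is proved, stated in full; the proofs are below) =====
def Claim_equal_parse_for_user : Prop := ∀ (file_line_list : List String), Dom_parse_for_user file_line_list → Pre_parse_for_user file_line_list → Spec_parse_for_user file_line_list (parse_for_user file_line_list)

-- ===== LEMMAS AND PROOFS =====

-- the Option-valued list of first tokens of the non-empty lines
def pvTokensOf : List String → Option (List String)
  | [] => some []
  | line :: rest =>
    if line = "" then pvTokensOf rest
    else
      match PySem.List.pyGet? (PySem.Str.split₀ line) 0 with
      | none => none
      | some t => (pvTokensOf rest).map (t :: ·)

lemma pvLoopA_eq (xs : List String) : ∀ s, pvLoopA xs s = (pvTokensOf xs).map (fun ts => PySem.Set.update s ts) := by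
  induction xs with
  | nil => intro s; simp [pvLoopA, pvTokensOf, PySem.Set.update]
  | cons line rest ih =>
    intro s
    by_cases h : line = ""
    · simp [pvLoopA, pvTokensOf, h, ih]
    · simp only [pvLoopA, pvTokensOf, if_neg h]
      cases hg : PySem.List.pyGet? (PySem.Str.split₀ line) 0 with
      | none => rfl
      | some t =>
        dsimp only
        rw [ih]
        cases htr : pvTokensOf rest with
        | none => rfl
        | some l => rfl

lemma pvLoopB_eq (xs : List String) : ∀ r, pvLoopB xs r = (pvTokensOf xs).map (fun ts => ts.foldl pvStepB r) := by
  induction xs with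
  | nil => intro r; simp [pvLoopB, pvTokensOf]
  | cons line rest ih =>
    intro r
    by_cases h : line = ""
    · simp [pvLoopB, pvTokensOf, h, ih]
    · simp only [pvLoopB, pvTokensOf, if_neg h]
      cases hg : PySem.List.pyGet? (PySem.Str.split₀ line) 0 with
      | none => rfl
      | some t =>
        dsimp only
        rw [ih]
        cases htr : pvTokensOf rest with
        | none => rfl
        | some l => simp

lemma pvTokensOf_isSome (xs : List String) (h : Pre_parse_for_user xs) : ∃ ts, pvTokensOf xs = some ts := by
  induction xs with
  | nil => exact ⟨[], rfl⟩
  | cons line rest ih =>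
    have hrest : Pre_parse_for_user rest := fun s hs => h s (List.mem_cons_of_mem _ hs)
    obtain ⟨ts, hts⟩ := ih hrest
    by_cases hl : line = ""
    · exact ⟨ts, by simp [pvTokensOf, hl, hts]⟩
    · have hne : PySem.Str.split₀ line ≠ [] := h line List.mem_cons_self hl
      cases hsp : PySem.Str.split₀ line with
      | nil => exact absurd hsp hne
      | cons t rest' =>
        exact ⟨t :: ts, by simp [pvTokensOf, hl, hsp, hts]⟩

-- proof-side reference insertion: linear ordered insert skipping duplicates
def pvInsB : List String → String → List String
  | [], t => [t]
  | x :: xs, t =>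
    if x < t then x :: pvInsB xs t
    else if x = t then x :: xs
    else t :: x :: xs

lemma pvInsB_mem (r : List String) (t x : String) : x ∈ pvInsB r t ↔ x ∈ r ∨ x = t := by
  induction r with
  | nil => simp [pvInsB]
  | cons y ys ih =>
    by_cases h1 : y < t
    · simp [pvInsB, h1, ih]; tauto
    · by_cases h2 : y = t
      · subst h2; simp [pvInsB]; tauto
      · simp [pvInsB, h1, h2]; tauto

lemma pvInsB_pairwise (r : List String) (t : String) (h : r.Pairwise (· < ·)) :
    (pvInsB r t).Pairwise (· < ·) := by
  induction r with
  | nil => simp [pvInsB]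
  | cons y ys ih =>
    have hc := List.pairwise_cons.mp h
    by_cases h1 : y < t
    · simp only [pvInsB, if_pos h1]
      refine List.pairwise_cons.mpr ⟨?_, ih hc.2⟩
      intro b hb
      rcases (pvInsB_mem ys t b).mp hb with hb' | rfl
      · exact hc.1 b hb'
      · exact h1
    · by_cases h2 : y = t
      · subst h2; simpa [pvInsB, h1] using h
      · have htl : t < y := lt_of_le_of_ne (not_lt.mp h1) (Ne.symm h2)
        simp only [pvInsB, if_neg h1, if_neg h2]
        refine List.pairwise_cons.mpr ⟨?_, h⟩
        intro b hb
        rcases List.mem_cons.mp hb with rfl | hb'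
        · exact htl
        · exact lt_trans htl (hc.1 b hb')

-- sortedness gives strict monotonicity of getD on in-range indices
lemma pv_getD_mono {r : List String} (h : r.Pairwise (· < ·)) {i j : Nat}
    (hij : i < j) (hj : j < r.length) : r.getD i "" < r.getD j "" := by
  have hi : i < r.length := lt_trans hij hj
  rw [List.getD_eq_getElem r "" hi, List.getD_eq_getElem r "" hj]
  exact List.pairwise_iff_getElem.mp h i j hi hj hij

-- binary-search invariant: the returned index separates '< t' from 'not < t'
lemma pvBis_inv (r : List String) (t : String) (hs : r.Pairwise (· < ·)) :
    ∀ n lo hi, hi - lo ≤ n → lo ≤ hi → hi ≤ r.length →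
    (∀ j < lo, r.getD j "" < t) → (∀ j, hi ≤ j → j < r.length → ¬ r.getD j "" < t) →
    pvBis r t lo hi ≤ r.length ∧
    (∀ j < pvBis r t lo hi, r.getD j "" < t) ∧
    (∀ j, pvBis r t lo hi ≤ j → j < r.length → ¬ r.getD j "" < t) := by
  intro n
  induction n with
  | zero =>
    intro lo hi hn hlh hhl h1 h2
    have : lo = hi := by omega
    subst this
    rw [pvBis, dif_neg (by omega)]
    exact ⟨le_trans hlh hhl, h1, h2⟩
  | succ n ih =>
    intro lo hi hn hlh hhl h1 h2
    by_cases h : lo < hi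
    · rw [pvBis, dif_pos h]
      have hmid1 : lo ≤ (lo + hi) / 2 := by omega
      have hmid2 : (lo + hi) / 2 < hi := by omega
      by_cases hm : r.getD ((lo + hi) / 2) "" < t
      · rw [if_pos hm]
        refine ih ((lo + hi) / 2 + 1) hi (by omega) (by omega) hhl ?_ h2
        intro j hj
        rcases Nat.lt_or_ge j ((lo + hi) / 2) with hj' | hj'
        · exact lt_trans (pv_getD_mono hs hj' (by omega)) hm
        · have : j = (lo + hi) / 2 := by omega
          subst this; exact hm
      · rw [if_neg hm]
        refine ih lo ((lo + hi) / 2) (by omega) (by omega) (by omega) h1 ?_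
        intro j hj hjl hlt
        rcases Nat.lt_or_ge ((lo + hi) / 2) j with hj' | hj'
        · exact hm (lt_trans (pv_getD_mono hs hj' hjl) hlt)
        · have : j = (lo + hi) / 2 := by omega
          subst this; exact hm hlt
    · have heq : lo = hi := by omega
      subst heq
      rw [pvBis, dif_neg h]
      exact ⟨le_trans hlh hhl, h1, h2⟩

-- any index with the separation property makes the insert step equal pvInsB
lemma pvInsB_char (t : String) : ∀ (r : List String) (i : Nat), i ≤ r.length →
    (∀ j < i, r.getD j "" < t) → (∀ j, i ≤ j → j < r.length → ¬ r.getD j "" < t) →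
    pvInsB r t = if i = r.length ∨ ¬ (r.getD i "" = t) then r.take i ++ t :: r.drop i else r := by
  intro r
  induction r with
  | nil =>
    intro i hi _ _
    have : i = 0 := by simpa using hi
    subst this
    simp [pvInsB]
  | cons x xs ih =>
    intro i hi h1 h2
    cases i with
    | zero =>
      have hx : ¬ x < t := by
        have := h2 0 (le_refl 0) (by simp)
        simpa using this
      by_cases hxt : x = t
      · subst hxt
        simp [pvInsB]
      · simp only [pvInsB, if_neg hx, if_neg hxt]
        have : ¬ ((x :: xs).getD 0 "" = t) := by simpa using hxt
        rw [if_pos (Or.inr this)]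
        simp
    | succ k =>
      have hx : x < t := by
        have := h1 0 (Nat.succ_pos k)
        simpa using this
      have hrec := ih k (by simpa using hi)
        (fun j hj => by simpa using h1 (j + 1) (by omega))
        (fun j hj hjl => by simpa using h2 (j + 1) (by omega) (by simpa using hjl))
      simp only [pvInsB, if_pos hx, hrec]
      have hlen : (k + 1 = (x :: xs).length) ↔ (k = xs.length) := by simp
      have hgd : (x :: xs).getD (k + 1) "" = xs.getD k "" := by simp
      by_cases hc : k = xs.length ∨ ¬ (xs.getD k "" = t)
      · rw [if_pos hc, if_pos (by rw [hlen, hgd]; exact hc)]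
        simp
      · rw [if_neg hc, if_neg (by rw [hlen, hgd]; exact hc)]

lemma pvStepB_eq (r : List String) (t : String) (hs : r.Pairwise (· < ·)) :
    pvStepB r t = pvInsB r t := by
  obtain ⟨hle, hlt, hge⟩ := pvBis_inv r t hs r.length 0 r.length (by omega) (by omega)
    (le_refl _) (by omega) (fun j hj hjl => by omega)
  rw [pvStepB, pvInsB_char t r (pvBis r t 0 r.length) hle hlt hge]

lemma pvFoldB_inv (ts : List String) : ∀ r : List String, r.Pairwise (· < ·) →
    ts.foldl pvStepB r = ts.foldl pvInsB r ∧
    (ts.foldl pvInsB r).Pairwise (· < ·) ∧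
    (∀ x, x ∈ ts.foldl pvInsB r ↔ x ∈ r ∨ x ∈ ts) := by
  induction ts with
  | nil => intro r h; exact ⟨rfl, h, by simp⟩
  | cons t rest ih =>
    intro r h
    obtain ⟨h0, h1, h2⟩ := ih (pvInsB r t) (pvInsB_pairwise r t h)
    refine ⟨?_, h1, fun x => ?_⟩
    · rw [List.foldl_cons, List.foldl_cons, pvStepB_eq r t h, h0]
    · rw [List.foldl_cons, h2 x, pvInsB_mem]
      simp [List.mem_cons]; tauto

-- the crux: repeated ordered insertion yields sorted(set(ts))
lemma pvFoldB_sorted (ts : List String) :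
    ts.foldl pvStepB [] = PySem.List.sorted (PySem.Set.ofList ts) (fun x => x) false := by
  obtain ⟨h0, h1, h2⟩ := pvFoldB_inv ts [] (by simp)
  rw [h0]
  refine Eq.symm (PySem.List.sorted_eq_of_perm_of_pairwise_lt _ _ _ ?_ h1)
  have hnodup1 : (ts.foldl pvInsB []).Nodup := h1.imp (fun h => ne_of_lt h)
  have hnodup2 : (PySem.Set.ofList ts : List String).Nodup := PySem.Set.nodup_ofList ts
  rw [List.perm_ext_iff_of_nodup hnodup1 hnodup2]
  intro x
  rw [h2 x]
  simp [PySem.Set.mem_ofList]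

-- ===== VERDICT (by name: the statement is the Claim_ definition above) =====
theorem parse_for_user_spec : Claim_equal_parse_for_user := by
  intro xs _ hpre
  unfold Spec_parse_for_user parse_for_user parse_for_user_alt
  obtain ⟨ts, hts⟩ := pvTokensOf_isSome xs hpre
  rw [pvLoopA_eq, pvLoopB_eq, hts]
  simp only [Option.map_some]
  have hupd : PySem.Set.update PySem.Set.empty ts = PySem.Set.ofList ts := rfl
  rw [hupd, pvFoldB_sorted]
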